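-- pv_equiv track=rewrite | github.com/Asasui2440/step2025 | lec05_tsp/google-step-tsp/minimum_spanning_tree.py | mst_edges_to_tour
-- ===== SOURCE A (Python) =====
-- def mst_edges_to_tour(mst_edges: list[tuple[float, int]], N: int) -> list[int]:
--     """
--     MSTの辺集合から巡回路（tour）を生成する（DFS順）
--     引数:
--         mst_edges: [(親, 子), ...]
--         N: 都市数
--     戻り値:
--         tour: 都市の順列リスト
--     """
--     from collections import defaultdict
--
--     # 隣接リストを作成
--     adj = defaultdict(list)
--     for u, v in mst_edges:
--         adj[u].append(v)
--         adj[v].append(u)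
--
--     tour = []
--     visited = [False] * N
--
--     def dfs(u):
--         visited[u] = True
--         tour.append(u)
--         for v in adj[u]:
--             if not visited[v]:
--                 dfs(v)
--
--     dfs(0)  # 0番からスタート
--     return tour
-- ===== SOURCE B (Python) =====
-- def mst_edges_to_tour(mst_edges: list[tuple[float, int]], N: int) -> list[int]:
--     """Dict-free rewrite: neighbors are found by scanning the edge list on demand,
--     and the recursive dfs is replaced by an explicit stack (iterative preorder)."""
--
--     def neighbors(u):
--         return [w for x, y in mst_edges
--                 for w in (([y] if x == u else []) + ([x] if y == u else []))]
--
--     visited = [False] * N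
--     tour = []
--     stack = [0]
--     while stack:
--         u = stack.pop()
--         if not visited[u]:
--             visited[u] = True
--             tour.append(u)
--             stack.extend(reversed(neighbors(u)))
--     return tour
-- ===== Notes on version B (the rewrite author's own statement) =====
-- stated objective: alternative
-- what changed: B builds no adjacency dict at all — each node's neighbor list is recomputed by a single comprehension scanning the edge list — and the recursive dfs is replaced by an explicit stack loop (pop, mark on pop, push neighbors reversed), trading the dict index for per-node edge-list scans.
-- outside the precondition, e.g. on mst_edges_to_tour([(0, 1), (1, -1), (-1, 5)], 2): A returns [0, 1], B returns [0, 1]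
import Mathlib
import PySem

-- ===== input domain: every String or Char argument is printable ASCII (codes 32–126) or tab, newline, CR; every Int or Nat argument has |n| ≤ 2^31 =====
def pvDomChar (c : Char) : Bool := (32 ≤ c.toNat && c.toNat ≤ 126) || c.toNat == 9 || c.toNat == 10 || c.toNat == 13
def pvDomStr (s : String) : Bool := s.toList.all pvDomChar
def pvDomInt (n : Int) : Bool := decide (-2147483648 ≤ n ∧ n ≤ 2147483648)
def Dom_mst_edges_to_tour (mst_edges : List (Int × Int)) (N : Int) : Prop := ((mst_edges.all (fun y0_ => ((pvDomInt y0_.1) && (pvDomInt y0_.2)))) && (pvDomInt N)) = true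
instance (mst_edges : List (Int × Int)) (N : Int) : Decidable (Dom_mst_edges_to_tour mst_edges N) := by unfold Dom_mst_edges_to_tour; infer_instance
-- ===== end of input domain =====

-- B replaces A's defaultdict adjacency + recursive DFS by a dict-free traversal: neighbors are
-- found by scanning the edge list on demand and an explicit stack replaces the recursion.


-- ===== PORT A =====
-- adjacency list build (defaultdict(list) filled edge by edge)
def pvBuildAdj (mst_edges : List (Int × Int)) : PySem.Dict Int (List Int) :=
  mst_edges.foldl
    (fun adj e =>
      (adj.modify e.1 [] (fun l => l ++ [e.2])).modify e.2 [] (fun l => l ++ [e.1]))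
    PySem.Dict.empty

-- A's recursive dfs; the fuel (N+1) bounds the recursion depth (each call marks a fresh slot);
-- index accesses where Python raises IndexError are excluded by Pre_ below.
def pvDfsA (adj : PySem.Dict Int (List Int)) :
    Nat → Int → List Bool × List Int → List Bool × List Int
  | 0, _, st => st
  | fuel + 1, u, st =>
    (adj.getD u []).foldl
      (fun st v =>
        if PySem.List.pyGetD st.1 v true = false then pvDfsA adj fuel v st else st)
      (PySem.List.pySetD st.1 u true, st.2 ++ [u])

def mst_edges_to_tour (mst_edges : List (Int × Int)) (N : Int) : List Int :=
  (pvDfsA (pvBuildAdj mst_edges) (N.toNat + 1) 0 (List.replicate N.toNat false, [])).2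

-- ===== PORT B =====
-- B's neighbors(u): one comprehension scanning the edge list (no dict is ever built)
def pvNbrs (mst_edges : List (Int × Int)) (u : Int) : List Int :=
  mst_edges.flatMap (fun e =>
    (if e.1 = u then [e.2] else []) ++ (if e.2 = u then [e.1] else []))

-- B's while loop over an explicit stack; the fuel bounds the number of pops (≤ 1 + total pushes).
def pvLoopB (nb : Int → List Int) :
    Nat → List Int → List Bool × List Int → List Bool × List Int
  | 0, _, st => st
  | _ + 1, [], st => st
  | fuel + 1, u :: stack, st =>
    if PySem.List.pyGetD st.1 u true = true then
      pvLoopB nb fuel stack st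
    else
      pvLoopB nb fuel
        ((nb u).reverse.foldl (fun s v => v :: s) stack)
        (PySem.List.pySetD st.1 u true, st.2 ++ [u])

def mst_edges_to_tour_alt (mst_edges : List (Int × Int)) (N : Int) : List Int :=
  (pvLoopB (pvNbrs mst_edges)
      ((2 * mst_edges.length + 1) * (N.toNat + 1) + 1)
      [0] (List.replicate N.toNat false, [])).2

-- ===== PRECONDITION & SPEC =====
-- undirected reachability closure of the input edge list from node 0 (a property of the input
-- graph only: no tour, no visiting order — not a copy of either port's traversal)
def pvReach (mst_edges : List (Int × Int)) : Nat → PySem.Set Int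
  | 0 => PySem.Set.ofList [0]
  | k + 1 =>
    mst_edges.foldl
      (fun T e => if T.contains e.1 || T.contains e.2 then (T.add e.1).add e.2 else T)
      (pvReach mst_edges k)

-- Pre_ excludes N < 1 and inputs where a node label connected to 0 in the edge graph falls outside
-- [-N, N): there the traversal reads visited[label] and A raises IndexError — except in rare
-- corners where negative-index aliasing marks such a branch visited before it is entered and A
-- still returns; connectivity cannot see that without replaying the traversal, so those corners
-- are excluded too (see the cited example).
def Pre_mst_edges_to_tour (mst_edges : List (Int × Int)) (N : Int) : Prop :=
  1 ≤ N ∧ ∀ u ∈ pvReach mst_edges (2 * mst_edges.length + 1), -N ≤ u ∧ u < N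
instance (mst_edges : List (Int × Int)) (N : Int) : Decidable (Pre_mst_edges_to_tour mst_edges N) := by unfold Pre_mst_edges_to_tour; infer_instance
def pvWitness_mst_edges_to_tour : (List (Int × Int)) × Int := ([(0, 1), (1, 2)], 3)
def Spec_mst_edges_to_tour (mst_edges : List (Int × Int)) (N : Int) (out : List Int) : Prop := out = mst_edges_to_tour_alt mst_edges N
instance (mst_edges : List (Int × Int)) (N : Int) (out : List Int) : Decidable (Spec_mst_edges_to_tour mst_edges N out) := by unfold Spec_mst_edges_to_tour; infer_instance

-- ===== CLAIM (what is proved, stated in full; the proofs are below) =====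
def Claim_equal_mst_edges_to_tour : Prop := ∀ (mst_edges : List (Int × Int)) (N : Int), Dom_mst_edges_to_tour mst_edges N → Pre_mst_edges_to_tour mst_edges N → Spec_mst_edges_to_tour mst_edges N (mst_edges_to_tour mst_edges N)

-- ===== LEMMAS AND PROOFS =====

-- B's on-demand neighbor scan computes exactly A's adjacency lists
theorem pv_adj_getD (l : List (Int × Int)) (d : PySem.Dict Int (List Int)) (u : Int) :
    (l.foldl
      (fun adj e =>
        (adj.modify e.1 [] (fun s => s ++ [e.2])).modify e.2 [] (fun s => s ++ [e.1]))
      d).getD u []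
    = d.getD u [] ++ pvNbrs l u := by
  induction l generalizing d with
  | nil => simp [pvNbrs]
  | cons e l ih =>
    simp only [List.foldl_cons]
    rw [ih]
    have hstep :
        (((d.modify e.1 [] (fun s => s ++ [e.2])).modify e.2 [] (fun s => s ++ [e.1])).getD u [])
        = d.getD u [] ++ ((if e.1 = u then [e.2] else []) ++ (if e.2 = u then [e.1] else [])) := by
      obtain ⟨a, b⟩ := e
      simp only [PySem.Dict.getD_modify]
      rcases eq_or_ne u b with h1 | h1
      · subst h1
        rcases eq_or_ne u a with h2 | h2
        · subst h2; simp
        · simp [h2, Ne.symm h2]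
      · rcases eq_or_ne u a with h2 | h2
        · subst h2; simp [h1, Ne.symm h1]
        · simp [h1, h2, Ne.symm h1, Ne.symm h2]
    rw [hstep, List.append_assoc]
    congr 1

theorem pv_nbrs_eq (mst_edges : List (Int × Int)) (u : Int) :
    pvNbrs mst_edges u = (pvBuildAdj mst_edges).getD u [] := by
  rw [pvBuildAdj, pv_adj_getD]
  simp [PySem.Dict.getD_empty]

theorem pv_nbrs_len (mst_edges : List (Int × Int)) (u : Int) :
    (pvNbrs mst_edges u).length ≤ 2 * mst_edges.length := by
  induction mst_edges with
  | nil => simp [pvNbrs]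
  | cons e l ih =>
    simp only [pvNbrs, List.flatMap_cons, List.length_append, List.length_cons] at *
    split_ifs <;> simp_all <;> omega

-- number of unvisited slots
def pvCf (vis : List Bool) : Nat := vis.count false

-- self-fuelling wrapper for A's dfs with just enough fuel (the meaning of one stack entry)
def pvDStep (adj : PySem.Dict Int (List Int)) (st : List Bool × List Int) (v : Int) :
    List Bool × List Int :=
  if PySem.List.pyGetD st.1 v true = false then pvDfsA adj (pvCf st.1 + 1) v st else st

-- a fold preserving an invariant and agreeing under it
theorem pv_foldl_congr_inv {α β : Type} (P : β → Prop) (f g : β → α → β) (l : List α) (b : β)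
    (hb : P b) (hpres : ∀ b a, P b → P (f b a)) (heq : ∀ b a, P b → f b a = g b a) :
    l.foldl f b = l.foldl g b := by
  induction l generalizing b with
  | nil => rfl
  | cons a l ih =>
    simp only [List.foldl_cons]
    rw [← heq b a hb]
    exact ih (f b a) (hpres b a hb)

-- reading a False entry pins down the marking write
theorem pv_mark_bridge (vis : List Bool) (u : Int)
    (h : PySem.List.pyGetD vis u true = false) :
    ∃ k, k < vis.length ∧ vis[k]? = some false ∧
      PySem.List.pySetD vis u true = vis.set k true := by
  unfold PySem.List.pyGetD PySem.List.pyGet? PySem.List.pySetD PySem.List.pySet? at *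
  cases hidx : PySem.List.pyIdx? vis.length u with
  | none => simp [hidx] at h
  | some k =>
    simp only [hidx, Option.bind_some, Option.map_some] at h ⊢
    cases hk : vis[k]? with
    | none => simp [hk] at h
    | some b =>
      rcases b with _ | _
      · exact ⟨k, (List.getElem?_eq_some_iff.mp hk).1, hk, rfl⟩
      · simp [hk] at h

theorem pv_cf_set_lt (vis : List Bool) (k : Nat) (hk : k < vis.length)
    (hf : vis[k]? = some false) : pvCf (vis.set k true) + 1 = pvCf vis := by
  unfold pvCf
  rw [List.count_set hk]
  have hv : vis[k] = false := (List.getElem?_eq_some_iff.mp hf).2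
  have hpos : 1 ≤ vis.count false :=
    List.count_pos_iff.mpr (List.mem_of_getElem? hf)
  rw [hv]
  simp
  omega

theorem pv_cf_mark_le (vis : List Bool) (u : Int) :
    pvCf (PySem.List.pySetD vis u true) ≤ pvCf vis := by
  unfold PySem.List.pySetD PySem.List.pySet?
  cases hidx : PySem.List.pyIdx? vis.length u with
  | none => simp
  | some k =>
    simp only [Option.map_some, Option.getD_some]
    by_cases hk : k < vis.length
    · unfold pvCf
      rw [List.count_set hk]
      split_ifs <;> simp_all
    · rw [List.set_eq_of_length_le (by omega)]

theorem pv_cf_pos (vis : List Bool) (u : Int)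
    (h : PySem.List.pyGetD vis u true = false) : 1 ≤ pvCf vis := by
  obtain ⟨k, hk, hf, -⟩ := pv_mark_bridge vis u h
  have : (false : Bool) ∈ vis := List.mem_of_getElem? hf
  unfold pvCf
  exact List.count_pos_iff.mpr this

theorem pv_dfsA_cf_mono (adj : PySem.Dict Int (List Int)) :
    ∀ (fuel : Nat) (u : Int) (st : List Bool × List Int),
      pvCf (pvDfsA adj fuel u st).1 ≤ pvCf st.1 := by
  intro fuel
  induction fuel with
  | zero => intro u st; simp [pvDfsA]
  | succ f ih =>
    intro u st
    rw [pvDfsA]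
    have h0 : pvCf (PySem.List.pySetD st.1 u true, st.2 ++ [u]).1 ≤ pvCf st.1 :=
      pv_cf_mark_le st.1 u
    refine le_trans ?_ h0
    generalize (PySem.List.pySetD st.1 u true, st.2 ++ [u]) = st1
    induction (adj.getD u []) generalizing st1 with
    | nil => simp
    | cons v l ihl =>
      simp only [List.foldl_cons]
      refine le_trans (ihl _) ?_
      by_cases hg : PySem.List.pyGetD st1.1 v true = false
      · simpa [hg] using ih v st1
      · simp [hg]

theorem pv_dfsA_fuel_irrel (adj : PySem.Dict Int (List Int)) :
    ∀ (k : Nat) (st : List Bool × List Int) (u : Int) (f f' : Nat),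
      PySem.List.pyGetD st.1 u true = false → pvCf st.1 ≤ k → k < f → k < f' →
      pvDfsA adj f u st = pvDfsA adj f' u st := by
  intro k
  induction k using Nat.strong_induction_on with
  | _ k ih =>
    intro st u f f' hg hcf hf hf'
    have h1 : 1 ≤ pvCf st.1 := pv_cf_pos st.1 u hg
    obtain ⟨j, hj, hjf, hset⟩ := pv_mark_bridge st.1 u hg
    obtain ⟨f0, rfl⟩ : ∃ f0, f = f0 + 1 := ⟨f - 1, by omega⟩
    obtain ⟨f0', rfl⟩ : ∃ f0', f' = f0' + 1 := ⟨f' - 1, by omega⟩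
    show (adj.getD u []).foldl _ _ = (adj.getD u []).foldl _ _
    have hst1 : pvCf (PySem.List.pySetD st.1 u true, st.2 ++ [u]).1 ≤ k - 1 := by
      have := pv_cf_set_lt st.1 j hj hjf
      simp only [hset]
      omega
    refine pv_foldl_congr_inv (fun st' => pvCf st'.1 ≤ k - 1) _ _ _ _ hst1 ?_ ?_
    · intro b a hb
      by_cases hgb : PySem.List.pyGetD b.1 a true = false
      · simp only [hgb, if_true]
        exact le_trans (pv_dfsA_cf_mono adj f0 a b) hb
      · simpa [hgb] using hb
    · intro b a hb
      by_cases hgb : PySem.List.pyGetD b.1 a true = false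
      · simp only [hgb, if_true]
        exact ih (k - 1) (by omega) b a f0 f0' hgb hb (by omega) (by omega)
      · simp [hgb]

theorem pv_push_eq_append (l s : List Int) :
    l.reverse.foldl (fun s v => v :: s) s = l ++ s := by
  rw [List.foldl_reverse]
  simp

theorem pv_loopB_eq_foldl (adj : PySem.Dict Int (List Int)) (nb : Int → List Int) (D : Nat)
    (hnb : ∀ u, nb u = adj.getD u []) (hdeg : ∀ u, (nb u).length ≤ D) :
    ∀ (g : Nat) (stack : List Int) (st : List Bool × List Int),
      stack.length + (D + 1) * pvCf st.1 ≤ g →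
      pvLoopB nb g stack st = stack.foldl (pvDStep adj) st := by
  intro g
  induction g with
  | zero =>
    intro stack st hle
    have : stack = [] := by
      cases stack with
      | nil => rfl
      | cons a l => simp at hle
    subst this
    rfl
  | succ g ih =>
    intro stack st hle
    cases stack with
    | nil => rfl
    | cons u s =>
      show (if PySem.List.pyGetD st.1 u true = true then _ else _) = _
      by_cases hg : PySem.List.pyGetD st.1 u true = true
      · rw [if_pos hg]
        rw [ih s st (by simp at hle ⊢; omega)]
        simp only [List.foldl_cons, pvDStep, hg]
        simp
      · rw [if_neg hg]
        have hgf : PySem.List.pyGetD st.1 u true = false := by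
          cases h : PySem.List.pyGetD st.1 u true
          · rfl
          · exact absurd h hg
        have h1 : 1 ≤ pvCf st.1 := pv_cf_pos st.1 u hgf
        obtain ⟨j, hj, hjf, hset⟩ := pv_mark_bridge st.1 u hgf
        have hcf1 : pvCf (PySem.List.pySetD st.1 u true) + 1 = pvCf st.1 := by
          rw [hset]; exact pv_cf_set_lt st.1 j hj hjf
        rw [pv_push_eq_append, hnb u]
        rw [ih (adj.getD u [] ++ s) (PySem.List.pySetD st.1 u true, st.2 ++ [u]) ?hfuel]
        case hfuel =>
          have hd := hdeg u
          rw [hnb u] at hd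
          dsimp only
          simp only [List.length_append, List.length_cons] at hle ⊢
          have hexp : (D + 1) * pvCf st.1
              = (D + 1) + (D + 1) * pvCf (PySem.List.pySetD st.1 u true) := by
            have h2 : pvCf (PySem.List.pySetD st.1 u true) + 1 = pvCf st.1 := by
              rw [hset]; exact pv_cf_set_lt st.1 j hj hjf
            rw [← h2]; ring
          omega
        rw [List.foldl_append, List.foldl_cons]
        congr 1
        -- the fold over adj[u] from the marked state IS one dfs call
        have hunfold : pvDStep adj st u
            = (adj.getD u []).foldl
                (fun st' v =>
                  if PySem.List.pyGetD st'.1 v true = false then pvDfsA adj (pvCf st.1) v st'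
                  else st')
                (PySem.List.pySetD st.1 u true, st.2 ++ [u]) := by
          simp only [pvDStep, hgf, if_true]
          rfl
        rw [hunfold]
        refine pv_foldl_congr_inv (fun st' => pvCf st'.1 + 1 ≤ pvCf st.1) _ _ _ _
          (by dsimp only; omega) ?_ ?_
        · intro b a hb
          by_cases hgb : PySem.List.pyGetD b.1 a true = false
          · simp only [pvDStep, hgb, if_true]
            have := pv_dfsA_cf_mono adj (pvCf b.1 + 1) a b
            omega
          · have hgb' : PySem.List.pyGetD b.1 a true = true := by
              cases h : PySem.List.pyGetD b.1 a true
              · exact absurd h hgb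
              · rfl
            simpa [pvDStep, hgb'] using hb
        · intro b a hb
          by_cases hgb : PySem.List.pyGetD b.1 a true = false
          · simp only [pvDStep, hgb, if_true]
            exact pv_dfsA_fuel_irrel adj (pvCf b.1) b a (pvCf b.1 + 1) (pvCf st.1) hgb
              le_rfl (by omega) (by omega)
          · have hgb' : PySem.List.pyGetD b.1 a true = true := by
              cases h : PySem.List.pyGetD b.1 a true
              · exact absurd h hgb
              · rfl
            have hgb2 : ¬ PySem.List.pyGetD b.1 a true = false := by simp [hgb']
            show pvDStep adj b a
              = if PySem.List.pyGetD b.1 a true = false then pvDfsA adj (pvCf st.1) a b else b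
            rw [if_neg hgb2]
            unfold pvDStep
            rw [if_neg hgb2]

theorem pv_cf_replicate (n : Nat) : pvCf (List.replicate n false) = n := by
  simp [pvCf]

-- ===== VERDICT (by name: the statement is the Claim_ definition above) =====
theorem mst_edges_to_tour_spec : Claim_equal_mst_edges_to_tour := by
  intro mst_edges N _hdom hpre
  obtain ⟨hN, -⟩ := hpre
  unfold Spec_mst_edges_to_tour mst_edges_to_tour mst_edges_to_tour_alt
  set adj := pvBuildAdj mst_edges with hadj
  set n := N.toNat with hn
  have hn1 : 1 ≤ n := by omega
  have hmain := pv_loopB_eq_foldl adj (pvNbrs mst_edges) (2 * mst_edges.length)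
    (fun u => pv_nbrs_eq mst_edges u)
    (fun u => pv_nbrs_len mst_edges u)
    ((2 * mst_edges.length + 1) * (n + 1) + 1)
    [0] (List.replicate n false, [])
    (by
      simp only [List.length_cons, List.length_nil, pv_cf_replicate]
      have : (2 * mst_edges.length + 1) * (n + 1)
          = (2 * mst_edges.length + 1) * n + (2 * mst_edges.length + 1) := by ring
      omega)
  rw [hmain]
  simp only [List.foldl_cons, List.foldl_nil]
  obtain ⟨m, hm⟩ : ∃ m, n = m + 1 := ⟨n - 1, by omega⟩
  have hget0 : PySem.List.pyGetD (List.replicate n false, ([] : List Int)).1 0 true = false := by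
    rw [hm]
    simp [List.replicate_succ, PySem.List.pyGetD_zero_cons]
  simp only [pvDStep, hget0, if_true]
  simp [pv_cf_replicate]
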